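-- pv_equiv track=rewrite | github.com/asinggih/coding-challenges | longest_streak_index.py | start_index
-- ===== SOURCE A (Python) =====
-- def start_index(arr):
--
--     lookup = dict()
--
--     longest_streak = 0
--     for i in range(len(arr)-1):
--         if arr[i+1] > arr[i]:
--             longest_streak += 1
--         elif arr[i+1] <= arr[i]:
--             lookup[i] = longest_streak
--             longest_streak = 0
--     lookup[len(arr)-1] = longest_streak
--
--     start_idx = None
--     largest = 0
--     for idx in lookup:
--         if lookup[idx] >= largest:
--             start_idx = idx
--             largest = lookup[idx]
--
--     if largest == 0:
--         return -1
--
--     return start_idx - largest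
-- ===== SOURCE B (Python) =====
-- def start_index(arr):
--     # single pass: running streak length, best length and best end index (ties: later wins)
--     cur = 0
--     best_len = 0
--     best_end = 0
--     for i in range(len(arr) - 1):
--         if arr[i + 1] > arr[i]:
--             cur += 1
--         else:
--             if cur >= best_len:
--                 best_len = cur
--                 best_end = i
--             cur = 0
--     if cur >= best_len:
--         best_len = cur
--         best_end = len(arr) - 1
--     if best_len == 0:
--         return -1
--     return best_end - best_len
-- ===== Notes on version B (the rewrite author's own statement) =====
-- stated objective: simpler
-- what changed: Replaced A's two-phase algorithm (build a dict of streak-end->streak-length, then re-scan the dict for the last maximal entry) by a single pass that maintains the running streak length and the best (length, end-index) pair directly, with no dict and no second scan.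
import Mathlib
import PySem

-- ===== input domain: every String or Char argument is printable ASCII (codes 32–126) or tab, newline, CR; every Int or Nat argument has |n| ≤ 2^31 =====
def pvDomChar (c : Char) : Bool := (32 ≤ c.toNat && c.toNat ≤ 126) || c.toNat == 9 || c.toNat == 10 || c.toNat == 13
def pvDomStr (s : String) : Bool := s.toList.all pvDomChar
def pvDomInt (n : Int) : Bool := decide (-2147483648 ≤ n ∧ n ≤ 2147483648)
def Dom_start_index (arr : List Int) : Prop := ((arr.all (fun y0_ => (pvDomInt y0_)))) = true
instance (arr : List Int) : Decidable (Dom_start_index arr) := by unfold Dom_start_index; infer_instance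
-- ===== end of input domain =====

-- B is a single pass keeping the running streak and the best (length, end) pair, instead of
-- A's dict of streak ends plus a second scan; same O(n) time, O(1) extra space, return value only.

-- ===== PORT A =====
-- first loop body: build lookup (streak-end index -> streak length); indices i, i+1 are always
-- in range on the iterated range, so the .getD 0 default of pyGet? is never used
def bodyA (arr : List Int) (st : PySem.Dict Int Int × Int) (i : Int) : PySem.Dict Int Int × Int :=
  if (PySem.List.pyGet? arr (i+1)).getD 0 > (PySem.List.pyGet? arr i).getD 0 then
    (st.1, st.2 + 1)
  else if (PySem.List.pyGet? arr (i+1)).getD 0 ≤ (PySem.List.pyGet? arr i).getD 0 then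
    (st.1.insert i st.2, 0)
  else st  -- unreachable: Int order is total

def start_index (arr : List Int) : Int :=
  let n : Int := arr.length
  let st := (PySem.List.pyRange 0 (n-1) 1).foldl (bodyA arr) (PySem.Dict.empty, 0)
  let lookup := st.1.insert (n-1) st.2
  -- second loop: 'for idx in lookup' iterates the keys; lookup[idx] never raises (idx is a key),
  -- so Dict.getD's default 0 is never used
  let sc := lookup.keys.foldl
    (fun (p : Option Int × Int) idx =>
      if lookup.getD idx 0 ≥ p.2 then (some idx, lookup.getD idx 0) else p)
    (none, 0)
  if sc.2 = 0 then -1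
  else (sc.1.getD 0) - sc.2  -- start_idx is always some here (lookup is nonempty): default unreachable

-- ===== PORT B =====
-- loop body: running streak cur, best streak length bl ending at index be (ties: later end wins)
def bodyB (arr : List Int) (st : Int × Int × Int) (i : Int) : Int × Int × Int :=
  if (PySem.List.pyGet? arr (i+1)).getD 0 > (PySem.List.pyGet? arr i).getD 0 then
    (st.1 + 1, st.2.1, st.2.2)
  else if st.1 ≥ st.2.1 then (0, st.1, i) else (0, st.2.1, st.2.2)

def start_index_alt (arr : List Int) : Int :=
  let n : Int := arr.length
  let st := (PySem.List.pyRange 0 (n-1) 1).foldl (bodyB arr) (0, 0, 0)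
  let fin := if st.1 ≥ st.2.1 then (st.1, n-1) else st.2
  if fin.1 = 0 then -1 else fin.2 - fin.1

-- ===== PRECONDITION & SPEC =====
def Spec_start_index (arr : List Int) (out : Int) : Prop := out = start_index_alt arr
instance (arr : List Int) (out : Int) : Decidable (Spec_start_index arr out) := by unfold Spec_start_index; infer_instance

-- ===== CLAIM (what is proved, stated in full; the proofs are below) =====
def Claim_equal_start_index : Prop := ∀ (arr : List Int), Dom_start_index arr → Spec_start_index arr (start_index arr)

-- ===== LEMMAS AND PROOFS =====

-- A's second loop, rephrased over the item list (proof-only helpers)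
def scanA (st : Option Int × Int) (kv : Int × Int) : Option Int × Int :=
  if kv.2 ≥ st.2 then (some kv.1, kv.2) else st

def scanB (st : Int × Int) (kv : Int × Int) : Int × Int :=
  if kv.2 ≥ st.1 then (kv.2, kv.1) else st

theorem scan_rel : ∀ (E : List (Int × Int)) (si : Option Int) (lg be : Int),
    (lg ≠ 0 → si = some be) →
    (E.foldl scanA (si, lg)).2 = (E.foldl scanB (lg, be)).1 ∧
    ((E.foldl scanA (si, lg)).2 ≠ 0 →
      (E.foldl scanA (si, lg)).1 = some (E.foldl scanB (lg, be)).2) := by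
  intro E
  induction E with
  | nil => intro si lg be h; exact ⟨rfl, h⟩
  | cons kv E ih =>
    intro si lg be h
    simp only [List.foldl_cons, scanA, scanB]
    by_cases hk : kv.2 ≥ lg
    · simp only [hk, if_pos]
      exact ih (some kv.1) kv.2 kv.1 (fun _ => rfl)
    · simp only [hk, if_neg]
      exact ih si lg be h

theorem main_inv (arr : List Int) : ∀ (r : List Int), r.Nodup →
    ∀ (d : PySem.Dict Int Int) (s bl be : Int),
    d.keys.Nodup → (∀ k ∈ d.keys, k ∉ r) →
    (r.foldl (bodyA arr) (d, s)).2 = (r.foldl (bodyB arr) (s, bl, be)).1 ∧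
    (r.foldl (bodyA arr) (d, s)).1.keys.Nodup ∧
    ∃ E : List (Int × Int),
      (r.foldl (bodyA arr) (d, s)).1.items = d.items ++ E ∧
      (∀ p ∈ E, p.1 ∈ r) ∧
      (r.foldl (bodyB arr) (s, bl, be)).2 = E.foldl scanB (bl, be) := by
  intro r
  induction r with
  | nil =>
    intro _ d s bl be hnd _
    exact ⟨rfl, hnd, [], by simp, by simp, rfl⟩
  | cons i r ih =>
    intro hnd d s bl be hdnd hfresh
    have hir : i ∉ r := (List.nodup_cons.mp hnd).1
    have hrnd : r.Nodup := (List.nodup_cons.mp hnd).2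
    simp only [List.foldl_cons, bodyA, bodyB]
    by_cases hgt : (PySem.List.pyGet? arr (i+1)).getD 0 > (PySem.List.pyGet? arr i).getD 0
    · simp only [hgt, if_pos]
      obtain ⟨h1, h2, E, hE1, hE2, hE3⟩ :=
        ih hrnd d (s+1) bl be hdnd (fun k hk => fun hkr => hfresh k hk (List.mem_cons_of_mem _ hkr))
      exact ⟨h1, h2, E, hE1, fun p hp => List.mem_cons_of_mem _ (hE2 p hp), hE3⟩
    · have hle : (PySem.List.pyGet? arr (i+1)).getD 0 ≤ (PySem.List.pyGet? arr i).getD 0 := by omega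
      simp only [hgt, if_neg, if_pos hle, not_false_iff]
      have hic : i ∉ d.keys := fun hk => hfresh i hk (List.mem_cons_self)
      have hcont : d.contains i = false := by
        cases hc : d.contains i
        · rfl
        · exact absurd ((PySem.Dict.contains_iff_mem_keys d i).mp hc) hic
      have hkeys : (d.insert i s).keys.Nodup := PySem.Dict.nodup_keys_insert d i s hdnd
      have hfresh' : ∀ k ∈ (d.insert i s).keys, k ∉ r := by
        intro k hk
        rcases (PySem.Dict.mem_keys_insert d i k s).mp hk with h | h
        · subst h; exact hir
        · exact fun hkr => hfresh k h (List.mem_cons_of_mem _ hkr)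
      by_cases hscan : s ≥ bl
      · simp only [hscan, if_pos]
        obtain ⟨h1, h2, E, hE1, hE2, hE3⟩ := ih hrnd (d.insert i s) 0 s i hkeys hfresh'
        refine ⟨h1, h2, (i, s) :: E, ?_, ?_, ?_⟩
        · rw [hE1, PySem.Dict.items_insert_of_not_contains d s hcont]; simp
        · intro p hp
          rcases List.mem_cons.mp hp with h | h
          · subst h; exact List.mem_cons_self
          · exact List.mem_cons_of_mem _ (hE2 p h)
        · rw [hE3]; simp [List.foldl_cons, scanB, hscan]
      · simp only [hscan, if_neg, not_false_iff]
        obtain ⟨h1, h2, E, hE1, hE2, hE3⟩ := ih hrnd (d.insert i s) 0 bl be hkeys hfresh'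
        refine ⟨h1, h2, (i, s) :: E, ?_, ?_, ?_⟩
        · rw [hE1, PySem.Dict.items_insert_of_not_contains d s hcont]; simp
        · intro p hp
          rcases List.mem_cons.mp hp with h | h
          · subst h; exact List.mem_cons_self
          · exact List.mem_cons_of_mem _ (hE2 p h)
        · rw [hE3]; simp [List.foldl_cons, scanB, hscan]

-- the keys-fold of A's second loop equals the items-fold by scanA (keys nodup)
theorem keys_fold_eq_items_fold (d : PySem.Dict Int Int) (hnd : d.keys.Nodup)
    (init : Option Int × Int) :
    d.keys.foldl
      (fun (p : Option Int × Int) idx =>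
        if d.getD idx 0 ≥ p.2 then (some idx, d.getD idx 0) else p) init
    = d.items.foldl scanA init := by
  rw [show d.keys = d.items.map Prod.fst from rfl, List.foldl_map]
  apply PySem.List.foldl_congr_mem
  intro acc kv hkv
  obtain ⟨k, v⟩ := kv
  have hv := PySem.Dict.getD_of_mem_items d hkv hnd 0
  simp [scanA, hv]

-- ===== VERDICT (by name: the statement is the Claim_ definition above) =====
theorem fold_concat_scanB (E : List (Int × Int)) (st : Int × Int) (kv : Int × Int) :
    (E ++ [kv]).foldl scanB st = scanB (E.foldl scanB st) kv := by
  simp [List.foldl_append]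

-- ===== VERDICT (by name: the statement is the Claim_ definition above) =====
theorem start_index_spec : Claim_equal_start_index := by
  intro arr _
  unfold Spec_start_index start_index start_index_alt
  dsimp only
  set n : Int := (arr.length : Int) with hn
  set r := PySem.List.pyRange 0 (n-1) 1 with hr
  obtain ⟨h1, h2, E, hE1, hE2, hE3⟩ :=
    main_inv arr r (PySem.List.nodup_pyRange_one 0 (n-1)) PySem.Dict.empty 0 0 0
      (by simp [pysem]) (by simp [pysem])
  set dA := r.foldl (bodyA arr) (PySem.Dict.empty, 0) with hdA
  set stB := r.foldl (bodyB arr) (0, 0, 0) with hstB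
  have hEitems : dA.1.items = E := by simpa [pysem] using hE1
  have hfreshlast : (n-1) ∉ dA.1.keys := by
    intro hmem
    rw [show dA.1.keys = dA.1.items.map Prod.fst from rfl, hEitems] at hmem
    obtain ⟨p, hp, hpk⟩ := List.mem_map.mp hmem
    have := (PySem.List.mem_pyRange_one).mp (hE2 p hp)
    omega
  have hcont : dA.1.contains (n-1) = false := by
    cases hc : dA.1.contains (n-1)
    · rfl
    · exact absurd ((PySem.Dict.contains_iff_mem_keys dA.1 (n-1)).mp hc) hfreshlast
  set lookup := dA.1.insert (n-1) dA.2 with hlk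
  have hlitems : lookup.items = E ++ [(n-1, dA.2)] := by
    rw [hlk, PySem.Dict.items_insert_of_not_contains dA.1 dA.2 hcont, hEitems]
  have hlnd : lookup.keys.Nodup := PySem.Dict.nodup_keys_insert dA.1 (n-1) dA.2 h2
  rw [keys_fold_eq_items_fold lookup hlnd (none, 0), hlitems]
  set F := E ++ [(n-1, dA.2)] with hF
  have hBfin : (if stB.1 ≥ stB.2.1 then (stB.1, n-1) else stB.2) = F.foldl scanB (0, 0) := by
    rw [hF, fold_concat_scanB, ← hE3, ← h1]
    simp [scanB]
  obtain ⟨hs1, hs2⟩ := scan_rel F none 0 0 (by simp)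
  rw [hBfin] at *
  by_cases hz : (F.foldl scanA (none, 0)).2 = 0
  · rw [if_pos hz, if_pos (by rw [← hs1, hz])]
  · rw [if_neg hz, if_neg (by rw [← hs1]; exact hz), hs2 hz, hs1]
    simp
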